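-- pv_equiv track=rewrite | github.com/vanzytay/CIKM_CUP | build_doc2vec_corpus.py | filter_duplicate_urls
-- ===== SOURCE A (Python) =====
-- def filter_duplicate_urls(urls):
-- 	if len(urls)<2:
-- 		return urls
--
-- 	res = [urls[0]]
-- 	for url in urls[1:]:
-- 		if len(res)>0 and url==res[-1]:
-- 			continue
-- 		res.append(url)
--
-- 	return res
-- ===== SOURCE B (Python) =====
-- def filter_duplicate_urls(urls):
-- 	if len(urls)<2:
-- 		return urls
-- 	# maximal-run decomposition: emit the head of each run, then skip past the run
-- 	res = []
-- 	n = len(urls)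
-- 	i = 0
-- 	while i < n:
-- 		res.append(urls[i])
-- 		j = i + 1
-- 		while j < n and urls[j] == urls[i]:
-- 			j += 1
-- 		i = j
-- 	return res
-- ===== Notes on version B (the rewrite author's own statement) =====
-- stated objective: alternative
-- what changed: Replaces A's single pass that appends to a result and compares each url to the result's last element with a maximal-run decomposition: a nested index loop emits the head of each run of equal urls in the input and skips past the run, never consulting the result list.
import Mathlib
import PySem

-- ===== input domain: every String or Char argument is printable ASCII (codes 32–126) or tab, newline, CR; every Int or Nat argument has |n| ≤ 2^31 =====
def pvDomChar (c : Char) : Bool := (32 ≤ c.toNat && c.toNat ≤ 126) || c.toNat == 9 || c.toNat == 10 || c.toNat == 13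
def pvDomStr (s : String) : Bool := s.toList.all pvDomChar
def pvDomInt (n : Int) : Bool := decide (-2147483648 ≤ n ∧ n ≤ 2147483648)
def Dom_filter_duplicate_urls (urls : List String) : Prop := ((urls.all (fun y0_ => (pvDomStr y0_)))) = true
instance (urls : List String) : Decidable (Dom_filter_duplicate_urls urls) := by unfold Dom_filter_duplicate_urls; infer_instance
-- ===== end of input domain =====

-- B changes: a nested index loop over maximal runs of equal urls (emit each run's head, skip the run), instead of A's single pass comparing each url to the result's last element (alternative, same cost).

-- ===== PORT A =====
def filter_duplicate_urls (urls : List String) : List String :=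
  if urls.length < 2 then urls
  else
    match urls with
    | [] => []
    | u0 :: rest =>
      rest.foldl (fun res url =>
        if res.length > 0 && (res.getLast?.getD "" == url) then res else res ++ [url]) [u0]

-- ===== PORT B =====
-- inner while: j advances while j < n and urls[j] == head (indices are in range, so getD is exact for urls[j])
def pvInner (urls : List String) (n : Nat) (head : String) (j : Nat) : Nat :=
  if j < n ∧ (urls.getD j "" == head) = true then pvInner urls n head (j + 1) else j
termination_by n - j
decreasing_by omega

theorem pvInner_ge (urls : List String) (n : Nat) (head : String) (j : Nat) :
    j ≤ pvInner urls n head j := by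
  unfold pvInner
  split
  · calc j ≤ j + 1 := Nat.le_succ j
      _ ≤ _ := pvInner_ge urls n head (j + 1)
  · exact Nat.le_refl j
termination_by n - j
decreasing_by omega

-- outer while: append urls[i] to res, then skip past the run starting at i
def pvOuter (urls : List String) (n : Nat) (i : Nat) (res : List String) : List String :=
  if i < n then
    pvOuter urls n (pvInner urls n (urls.getD i "") (i + 1)) (res ++ [urls.getD i ""])
  else res
termination_by n - i
decreasing_by
  have := pvInner_ge urls n (urls.getD i "") (i + 1); omega

def filter_duplicate_urls_alt (urls : List String) : List String :=
  if urls.length < 2 then urls else pvOuter urls urls.length 0 []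

-- ===== PRECONDITION & SPEC =====
def Spec_filter_duplicate_urls (urls : List String) (out : List String) : Prop := out = filter_duplicate_urls_alt urls
instance (urls : List String) (out : List String) : Decidable (Spec_filter_duplicate_urls urls out) := by unfold Spec_filter_duplicate_urls; infer_instance

-- ===== CLAIM (what is proved, stated in full; the proofs are below) =====
def Claim_equal_filter_duplicate_urls : Prop := ∀ (urls : List String), Dom_filter_duplicate_urls urls → Spec_filter_duplicate_urls urls (filter_duplicate_urls urls)

-- ===== LEMMAS AND PROOFS =====

-- common characterisation both ports are proved equal to: the heads of the maximal runs
def pvRunHeads : List String → List String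
  | [] => []
  | head :: rest => head :: pvRunHeads (rest.dropWhile (fun x => x == head))
termination_by l => l.length
decreasing_by
  exact Nat.lt_succ_of_le (List.length_dropWhile_le _ _)

-- A's loop invariant: folding A's step over `rest` from a nonempty accumulator ending in `last`
-- appends the run heads of `rest` after dropping the leading run of `last`
theorem pvFoldEq (rest : List String) (acc : List String) (last : String)
    (hne : acc ≠ []) (hl : acc.getLast? = some last) :
    rest.foldl (fun res url =>
        if res.length > 0 && (res.getLast?.getD "" == url) then res else res ++ [url]) acc
      = acc ++ pvRunHeads (rest.dropWhile (fun x => x == last)) := by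
  induction rest generalizing acc last with
  | nil => simp [pvRunHeads]
  | cons r rs ih =>
    have hlen : acc.length > 0 := List.length_pos_iff.mpr hne
    simp only [List.foldl_cons, List.dropWhile_cons]
    by_cases hrl : r = last
    · subst hrl
      rw [show (if (decide (acc.length > 0) && acc.getLast?.getD "" == r) = true
            then acc else acc ++ [r]) = acc from by simp [hlen, hl]]
      simpa using ih acc r hne hl
    · rw [show (if (decide (acc.length > 0) && acc.getLast?.getD "" == r) = true
            then acc else acc ++ [r]) = acc ++ [r] from by
          simp [hl, hlen]; exact fun h => hrl h.symm]
      rw [ih (acc ++ [r]) r (by simp) (by simp)]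
      simp [hrl, pvRunHeads]

-- the inner while computes: first index ≥ j past the run of `head` = j + length of the equal prefix of drop j
theorem pvInnerEq (urls : List String) (head : String) (j : Nat) :
    pvInner urls urls.length head j
      = j + ((urls.drop j).takeWhile (fun x => x == head)).length := by
  unfold pvInner
  split
  · rename_i h
    obtain ⟨hj, hh⟩ := h
    obtain ⟨u, t, hd⟩ : ∃ u t, urls.drop j = u :: t := by
      cases hdj : urls.drop j with
      | nil => exfalso; have := List.drop_eq_nil_iff.mp hdj; omega
      | cons u t => exact ⟨u, t, rfl⟩
    have hu : urls.getD j "" = u := by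
      have h0 : urls[j + 0]? = some u := by
        rw [← List.getElem?_drop]; simp [hd]
      have : urls[j]? = some u := by simpa using h0
      simp [List.getD, this]
    rw [pvInnerEq urls head (j + 1)]
    have ht : urls.drop (j + 1) = t := by
      have : urls.drop (j+1) = (urls.drop j).drop 1 := by rw [List.drop_drop]
      simp [this, hd]
    rw [ht, hd, List.takeWhile_cons]
    rw [hu] at hh
    simp [hh]; omega
  · rename_i h
    rcases not_and_or.mp h with hj | hh
    · have : urls.drop j = [] := List.drop_eq_nil_iff.mpr (by omega)
      simp [this]
    · obtain ⟨u, t, hd⟩ | hnil : (∃ u t, urls.drop j = u :: t) ∨ urls.drop j = [] := by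
        cases hdj : urls.drop j with
        | nil => exact Or.inr rfl
        | cons u t => exact Or.inl ⟨u, t, rfl⟩
      · have hjlt : j < urls.length := by
          by_contra hc
          have := List.drop_eq_nil_iff.mpr (by omega : urls.length ≤ j)
          rw [this] at hd; exact (List.cons_ne_nil u t) hd.symm
        have hu : urls.getD j "" = u := by
          have h0 : urls[j + 0]? = some u := by
            rw [← List.getElem?_drop]; simp [hd]
          have : urls[j]? = some u := by simpa using h0
          simp [List.getD, this]
        have hh' : (u == head) = false := by
          cases hb : (u == head) with
          | true => exact absurd (by rw [hu]; exact hb) hh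
          | false => rfl
        rw [hd, List.takeWhile_cons, hh']
        simp
      · simp [hnil]
  termination_by urls.length - j
  decreasing_by omega

-- the outer while computes res ++ run heads of the remaining suffix
theorem pvOuterEq (urls : List String) (i : Nat) (res : List String) :
    pvOuter urls urls.length i res = res ++ pvRunHeads (urls.drop i) := by
  unfold pvOuter
  split
  · rename_i hi
    obtain ⟨u, t, hd⟩ : ∃ u t, urls.drop i = u :: t := by
      cases hdj : urls.drop i with
      | nil => exfalso; have := List.drop_eq_nil_iff.mp hdj; omega
      | cons u t => exact ⟨u, t, rfl⟩
    have hu : urls.getD i "" = u := by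
      have h0 : urls[i + 0]? = some u := by
        rw [← List.getElem?_drop]; simp [hd]
      have : urls[i]? = some u := by simpa using h0
      simp [List.getD, this]
    have ht : urls.drop (i + 1) = t := by
      have : urls.drop (i+1) = (urls.drop i).drop 1 := by rw [List.drop_drop]
      simp [this, hd]
    rw [hu, pvInnerEq urls u (i + 1), ht]
    rw [pvOuterEq urls ((i + 1) + (t.takeWhile (fun x => x == u)).length) (res ++ [u])]
    have hdrop : urls.drop ((i + 1) + (t.takeWhile (fun x => x == u)).length)
        = t.dropWhile (fun x => x == u) := by
      rw [← List.drop_drop, ht]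
      calc List.drop (List.takeWhile (fun x => x == u) t).length t
          = (List.takeWhile (fun x => x == u) t ++ List.dropWhile (fun x => x == u) t).drop
              (List.takeWhile (fun x => x == u) t).length := by
            rw [List.takeWhile_append_dropWhile]
        _ = List.dropWhile (fun x => x == u) t := List.drop_left
    rw [hdrop, hd]
    simp [pvRunHeads]
  · rename_i hi
    have : urls.drop i = [] := List.drop_eq_nil_iff.mpr (by omega)
    simp [this, pvRunHeads]
  termination_by urls.length - i
  decreasing_by
    have := pvInner_ge urls urls.length (urls.getD i "") (i + 1); omega

-- ===== VERDICT (by name: the statement is the Claim_ definition above) =====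
theorem filter_duplicate_urls_spec : Claim_equal_filter_duplicate_urls := by
  intro urls _
  unfold Spec_filter_duplicate_urls filter_duplicate_urls filter_duplicate_urls_alt
  split
  · rfl
  · rw [pvOuterEq urls 0 []]
    match urls with
    | [] => simp [pvRunHeads]
    | u0 :: rest =>
      simp only
      rw [pvFoldEq rest [u0] u0 (by simp) (by simp)]
      simp [pvRunHeads]
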